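-- pv_equiv track=rewrite | github.com/andrewkdinh/fund-indicators | Functions.py | removeExtraDatesAndCloseValues
-- ===== SOURCE A (Python) =====
-- def removeExtraDatesAndCloseValues(list1, list2):
--     # Returns the two lists but with the extra dates and corresponding close values removed
--     # list = [[dates], [close values]]
--
--     newList1 = [[], []]
--     newList2 = [[], []]
--
--     for i in range(0, len(list1[0]), 1):
--         for j in range(0, len(list2[0]), 1):
--             if list1[0][i] == list2[0][j]:
--                 newList1[0].append(list1[0][i])
--                 newList2[0].append(list1[0][i])
--                 newList1[1].append(list1[1][i])
--                 newList2[1].append(list2[1][j])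
--                 break
--
--     returnList = []
--     returnList.append(newList1)
--     returnList.append(newList2)
--     return returnList
-- ===== SOURCE B (Python) =====
-- def removeExtraDatesAndCloseValues(list1, list2):
--     # Sort-and-binary-search join instead of nested scans: list2's dates are
--     # reduced to first-occurrence (date, index) pairs, sorted once by date, and
--     # each date of list1 is located by a leftmost binary search.
--     pairs = []
--     seen = set()
--     for j, d in enumerate(list2[0]):
--         if d not in seen:
--             seen.add(d)
--             pairs.append((d, j))
--     sp = sorted(pairs, key=lambda p: p[0])
--
--     def locate(d):
--         lo, hi = 0, len(sp)
--         while lo < hi: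
--             mid = (lo + hi) // 2
--             if sp[mid][0] < d:
--                 lo = mid + 1
--             else:
--                 hi = mid
--         if lo < len(sp) and sp[lo][0] == d:
--             return sp[lo][1]
--         return None
--
--     dates, close1, close2 = [], [], []
--     for i, d in enumerate(list1[0]):
--         j = locate(d)
--         if j is not None:
--             dates.append(d)
--             close1.append(list1[1][i])
--             close2.append(list2[1][j])
--     return [[dates, close1], [list(dates), close2]]
-- ===== Notes on version B (the rewrite author's own statement) =====
-- stated objective: alternative
-- what changed: Replaces the nested scan by a sort-and-binary-search join: list2's dates are reduced to first-occurrence (date, index) pairs via a seen-set, sorted once by date, and each date of list1 is located by a hand-written leftmost binary search; it trades A's O(n*m) worst case for O((n+m) log m) at the cost of a sort.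
-- outside the precondition, e.g. on removeExtraDatesAndCloseValues([[]], []): A returns [[[], []], [[], []]], B raises IndexError
import Mathlib
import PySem

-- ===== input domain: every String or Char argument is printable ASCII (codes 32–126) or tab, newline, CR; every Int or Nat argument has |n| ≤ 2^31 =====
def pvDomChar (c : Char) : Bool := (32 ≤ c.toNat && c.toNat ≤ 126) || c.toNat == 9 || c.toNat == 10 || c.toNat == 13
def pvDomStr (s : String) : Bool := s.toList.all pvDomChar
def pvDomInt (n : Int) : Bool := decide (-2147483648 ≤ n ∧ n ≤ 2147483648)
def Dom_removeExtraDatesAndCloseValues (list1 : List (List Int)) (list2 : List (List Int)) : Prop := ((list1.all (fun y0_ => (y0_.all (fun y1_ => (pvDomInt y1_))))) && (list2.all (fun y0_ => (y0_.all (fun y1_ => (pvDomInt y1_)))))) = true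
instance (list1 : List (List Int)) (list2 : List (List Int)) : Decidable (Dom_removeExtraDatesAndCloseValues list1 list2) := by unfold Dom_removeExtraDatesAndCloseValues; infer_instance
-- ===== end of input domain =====

-- B replaces A's nested date search by a sort-and-binary-search join: list2's dates
-- become first-occurrence (date, index) pairs, sorted once by date, and each list1
-- date is located by a leftmost binary search (alternative algorithm, same measured cost).

-- ===== PORT A =====
-- inner 'for j in range(len(list2[0])): if … : append…; break' loop of A:
-- first index j (from start j0) with x == ys[j], or none
def pvScanA (x : Int) : List Int → Int → Option Int
  | [], _ => none
  | y :: ys, j => if x = y then some j else pvScanA x ys (j + 1)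

def removeExtraDatesAndCloseValues (list1 : List (List Int)) (list2 : List (List Int)) : List (List (List Int)) :=
  let st := (PySem.List.pyRange 0 ((PySem.List.pyGetD list1 0 []).length : Int) 1).foldl
    (fun (s : List Int × List Int × List Int × List Int) i =>
      let x := PySem.List.pyGetD (PySem.List.pyGetD list1 0 []) i 0
      match pvScanA x (PySem.List.pyGetD list2 0 []) 0 with
      | some j => (s.1 ++ [x], s.2.1 ++ [PySem.List.pyGetD (PySem.List.pyGetD list1 1 []) i 0],
                   s.2.2.1 ++ [x], s.2.2.2 ++ [PySem.List.pyGetD (PySem.List.pyGetD list2 1 []) j 0])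
      | none => s)
    ([], [], [], [])
  [[st.1, st.2.1], [st.2.2.1, st.2.2.2]]

-- ===== PORT B =====
-- the 'while lo < hi' leftmost binary search of Source B (hand-written there, so ported by hand; exact step for step)
def pvBisect (sp : List (Int × Int)) (d : Int) (lo hi : Int) : Int :=
  if h : lo < hi then
    let mid := PySem.Int.floordiv (lo + hi) 2
    if (PySem.List.pyGetD sp mid (0, 0)).1 < d then pvBisect sp d (mid + 1) hi
    else pvBisect sp d lo mid
  else lo
termination_by (hi - lo).toNat
decreasing_by
  · have := PySem.Int.floordiv_two_mid_bounds (lo := lo) (hi := hi) (by omega)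
    omega
  · have h2 : PySem.Int.floordiv (lo + hi) 2 < hi := by
      rw [PySem.Int.floordiv_lt_iff_lt_mul (by omega)]; omega
    have := PySem.Int.floordiv_two_mid_bounds (lo := lo) (hi := hi) (by omega)
    omega

-- Source B's 'locate': binary search then the 'lo < len(sp) and sp[lo][0] == d' check
def pvLocate (sp : List (Int × Int)) (d : Int) : Option Int :=
  let lo := pvBisect sp d 0 (sp.length : Int)
  if lo < (sp.length : Int) ∧ (PySem.List.pyGetD sp lo (0, 0)).1 = d
  then some (PySem.List.pyGetD sp lo (0, 0)).2 else none

-- Source B's first loop: first-occurrence (date, index) pairs of ys, via a seen-set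
def pvPairs (ys : List Int) : List (Int × Int) :=
  ((PySem.List.enumerate ys).foldl
    (fun (s : PySem.Set Int × List (Int × Int)) p =>
      if p.2 ∈ s.1 then s else (PySem.Set.add s.1 p.2, s.2 ++ [(p.2, p.1)]))
    (PySem.Set.empty, [])).2

def removeExtraDatesAndCloseValues_alt (list1 : List (List Int)) (list2 : List (List Int)) : List (List (List Int)) :=
  let sp := PySem.List.sorted (pvPairs (PySem.List.pyGetD list2 0 [])) (fun p => p.1) false
  let st := (PySem.List.enumerate (PySem.List.pyGetD list1 0 [])).foldl
    (fun (s : List Int × List Int × List Int) p =>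
      match pvLocate sp p.2 with
      | some j => (s.1 ++ [p.2], s.2.1 ++ [PySem.List.pyGetD (PySem.List.pyGetD list1 1 []) p.1 0],
                   s.2.2 ++ [PySem.List.pyGetD (PySem.List.pyGetD list2 1 []) j 0])
      | none => s)
    ([], [], [])
  [[st.1, st.2.1], [st.1, st.2.2]]

-- ===== PRECONDITION & SPEC =====
-- Pre_ excludes exactly the inputs where Python A raises (empty list1; empty list2 reached by
-- a nonempty list1[0]; a matching date whose index is out of range of list1[1] or list2[1]),
-- and additionally the degenerate corner list2 == [] with list1[0] == [], where A returns the
-- empty result only because its loops never touch list2 while B indexes list2[0] unconditionally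
-- and raises there (see claim.json "cites").
def Pre_removeExtraDatesAndCloseValues (list1 : List (List Int)) (list2 : List (List Int)) : Prop :=
  list1 ≠ [] ∧ list2 ≠ [] ∧
  ∀ i < list1.headI.length, list1.headI.getD i 0 ∈ list2.headI →
    (i < (list1.getD 1 []).length ∧
     list2.headI.idxOf (list1.headI.getD i 0) < (list2.getD 1 []).length)
instance (list1 : List (List Int)) (list2 : List (List Int)) : Decidable (Pre_removeExtraDatesAndCloseValues list1 list2) := by unfold Pre_removeExtraDatesAndCloseValues; infer_instance

def pvWitness_removeExtraDatesAndCloseValues : List (List Int) × List (List Int) :=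
  ([[1, 2], [10, 20]], [[2, 3], [200, 300]])

def Spec_removeExtraDatesAndCloseValues (list1 : List (List Int)) (list2 : List (List Int)) (out : List (List (List Int))) : Prop := out = removeExtraDatesAndCloseValues_alt list1 list2
instance (list1 : List (List Int)) (list2 : List (List Int)) (out : List (List (List Int))) : Decidable (Spec_removeExtraDatesAndCloseValues list1 list2 out) := by unfold Spec_removeExtraDatesAndCloseValues; infer_instance

-- ===== CLAIM (what is proved, stated in full; the proofs are below) =====
def Claim_equal_removeExtraDatesAndCloseValues : Prop := ∀ (list1 : List (List Int)) (list2 : List (List Int)), Dom_removeExtraDatesAndCloseValues list1 list2 → Pre_removeExtraDatesAndCloseValues list1 list2 → Spec_removeExtraDatesAndCloseValues list1 list2 (removeExtraDatesAndCloseValues list1 list2)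

-- ===== LEMMAS AND PROOFS =====

-- the seen-set fold collects exactly the pairs (d, first index of d)
lemma pvPairs_fold_mem (d j : Int) : ∀ (ys : List Int) (a : Int) (s : PySem.Set Int) (acc : List (Int × Int)),
    (d, j) ∈ ((PySem.List.enumerate ys a).foldl
      (fun (st : PySem.Set Int × List (Int × Int)) p =>
        if p.2 ∈ st.1 then st else (PySem.Set.add st.1 p.2, st.2 ++ [(p.2, p.1)])) (s, acc)).2
      ↔ (d, j) ∈ acc ∨ (d ∉ s ∧ pvScanA d ys a = some j) := by
  intro ys
  induction ys with
  | nil => intro a s acc; simp [PySem.List.enumerate_nil, pvScanA]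
  | cons y ys ih =>
    intro a s acc
    rw [PySem.List.enumerate_cons, List.foldl_cons]
    by_cases hy : y ∈ s
    · simp only [hy, if_pos]
      rw [ih]
      by_cases hd : d = y
      · subst hd; simp [pvScanA, hy]
      · simp [pvScanA, hd]
    · simp only [hy, if_neg, not_false_iff]
      rw [ih]
      by_cases hd : d = y
      · subst hd
        simp [pvScanA, hy, eq_comm]
      · simp [pvScanA, hd, PySem.Set.mem_add]


lemma pvPairs_fold_nodup : ∀ (ys : List Int) (a : Int) (s : PySem.Set Int) (acc : List (Int × Int)),
    (∀ p ∈ acc, p.1 ∈ s) → (acc.map Prod.fst).Nodup →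
    (((PySem.List.enumerate ys a).foldl
      (fun (st : PySem.Set Int × List (Int × Int)) p =>
        if p.2 ∈ st.1 then st else (PySem.Set.add st.1 p.2, st.2 ++ [(p.2, p.1)])) (s, acc)).2.map Prod.fst).Nodup := by
  intro ys
  induction ys with
  | nil => intro a s acc _ h2; simpa [PySem.List.enumerate_nil] using h2
  | cons y ys ih =>
    intro a s acc h1 h2
    rw [PySem.List.enumerate_cons, List.foldl_cons]
    by_cases hy : y ∈ s
    · simp only [hy, if_pos]
      exact ih _ _ _ h1 h2
    · simp only [hy, if_neg, not_false_iff]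
      refine ih _ _ _ ?_ ?_
      · intro p hp
        rcases List.mem_append.1 hp with h | h
        · exact (PySem.Set.mem_add _ _ _).2 (Or.inl (h1 p h))
        · simp only [List.mem_singleton] at h; subst h
          exact (PySem.Set.mem_add _ _ _).2 (Or.inr rfl)
      · rw [List.map_append, List.nodup_append]
        refine ⟨h2, List.nodup_singleton _, ?_⟩
        intro x hx x' hx'
        rcases List.mem_map.1 hx with ⟨p, hp, hpe⟩
        have hxy : x' = y := by simpa using hx'
        subst hxy
        intro heq
        exact hy (heq ▸ hpe ▸ h1 p hp)


-- leftmost binary search invariant on a key-sorted list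
lemma pvBisect_spec (sp : List (Int × Int)) (d : Int)
    (hsort : sp.Pairwise (fun p q => p.1 ≤ q.1)) :
    ∀ (n : Nat) (lo hi : Int), (hi - lo).toNat = n → 0 ≤ lo → lo ≤ hi → hi ≤ (sp.length : Int) →
    (∀ (k : Nat) (hk : k < sp.length), (k : Int) < lo → (sp[k]).1 < d) →
    (∀ (k : Nat) (hk : k < sp.length), hi ≤ (k : Int) → d ≤ (sp[k]).1) →
    (0 ≤ pvBisect sp d lo hi ∧ pvBisect sp d lo hi ≤ (sp.length : Int) ∧
     (∀ (k : Nat) (hk : k < sp.length), (k : Int) < pvBisect sp d lo hi → (sp[k]).1 < d) ∧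
     (∀ (k : Nat) (hk : k < sp.length), pvBisect sp d lo hi ≤ (k : Int) → d ≤ (sp[k]).1)) := by
  have hmono : ∀ (p q : Nat) (hp : p < sp.length) (hq : q < sp.length), p ≤ q → (sp[p]).1 ≤ (sp[q]).1 := by
    intro p q hp hq hpq
    rcases Nat.lt_or_ge p q with h | h
    · exact List.pairwise_iff_getElem.1 hsort p q hp hq h
    · have : p = q := by omega
      subst this; exact le_rfl
  intro n
  induction n using Nat.strong_induction_on with
  | _ n ih =>
    intro lo hi hn h0 hlh hhl hlow hhigh
    rw [pvBisect]
    by_cases h : lo < hi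
    · simp only [h, dif_pos]
      have hb := PySem.Int.floordiv_two_mid_bounds (lo := lo) (hi := hi) (by omega)
      have hmlt : PySem.Int.floordiv (lo + hi) 2 < hi := by
        rw [PySem.Int.floordiv_lt_iff_lt_mul (by omega)]; omega
      set mid := PySem.Int.floordiv (lo + hi) 2 with hmid
      have hget : PySem.List.pyGetD sp mid (0, 0) = sp[mid.toNat]'(by omega) := by
        rw [PySem.List.pyGetD_eq_getElem sp (0, 0) (by omega) (by omega)]
      rw [hget]
      split_ifs with hc
      · refine ih ((hi - (mid + 1)).toNat) (by omega) (mid + 1) hi (by omega) (by omega) (by omega) hhl ?_ hhigh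
        intro k hk hklt
        have : (sp[k]).1 ≤ (sp[mid.toNat]'(by omega)).1 := hmono k mid.toNat hk (by omega) (by omega)
        omega
      · refine ih ((mid - lo).toNat) (by omega) lo mid (by omega) (by omega) (by omega) (by omega) hlow ?_
        intro k hk hkge
        have : (sp[mid.toNat]'(by omega)).1 ≤ (sp[k]).1 := hmono mid.toNat k (by omega) hk (by omega)
        omega
    · simp only [h, dif_neg, not_false_iff]
      have : lo = hi := by omega
      subst this
      exact ⟨h0, by omega, fun k hk h => hlow k hk h, fun k hk h => hhigh k hk h⟩


-- locate on the sorted first-occurrence pairs computes A's inner break-scan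
lemma pvLocate_eq_scan (ys : List Int) (d : Int) :
    pvLocate (PySem.List.sorted (pvPairs ys) (fun p => p.1) false) d = pvScanA d ys 0 := by
  set sp := PySem.List.sorted (pvPairs ys) (fun p => p.1) false with hsp
  have hmem : ∀ (d' j : Int), (d', j) ∈ sp ↔ pvScanA d' ys 0 = some j := by
    intro d' j
    rw [hsp, PySem.List.mem_sorted]
    unfold pvPairs
    rw [pvPairs_fold_mem]
    simp [PySem.Set.empty]
  have hsort : sp.Pairwise (fun p q => p.1 ≤ q.1) := PySem.List.sorted_pairwise _ _
  have hnodup : (sp.map Prod.fst).Nodup := by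
    have hperm : sp.Perm (pvPairs ys) := PySem.List.sorted_perm _ _ _
    refine (hperm.map Prod.fst).nodup_iff.2 ?_
    unfold pvPairs
    exact pvPairs_fold_nodup ys 0 PySem.Set.empty [] (by simp) (by simp)
  have hmono : ∀ (p q : Nat) (hp : p < sp.length) (hq : q < sp.length), p ≤ q → (sp[p]).1 ≤ (sp[q]).1 := by
    intro p q hp hq hpq
    rcases Nat.lt_or_ge p q with h | h
    · exact List.pairwise_iff_getElem.1 hsort p q hp hq h
    · have : p = q := by omega
      subst this; exact le_rfl
  obtain ⟨hr0, hrlen, hlt, hge⟩ := pvBisect_spec sp d hsort ((sp.length : Int) - 0).toNat 0 (sp.length : Int)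
    rfl le_rfl (by positivity) le_rfl
    (fun k hk h => absurd h (by omega)) (fun k hk h => absurd h (by omega))
  set r := pvBisect sp d 0 (sp.length : Int) with hrdef
  unfold pvLocate
  rw [← hrdef]
  cases hscan : pvScanA d ys 0 with
  | some j =>
    obtain ⟨p, hp, hpe⟩ := List.mem_iff_getElem.1 ((hmem d j).2 hscan)
    have hrp : r ≤ (p : Int) := by
      by_contra hcon
      have : (sp[p]).1 < d := hlt p hp (by omega)
      rw [hpe] at this; omega
    have hrlt : r.toNat < sp.length := by omega
    have hged : d ≤ (sp[r.toNat]).1 := hge r.toNat hrlt (by omega)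
    have hler : (sp[r.toNat]).1 ≤ d := by
      have := hmono r.toNat p hrlt hp (by omega)
      rw [hpe] at this; exact this
    have hfst : (sp[r.toNat]).1 = d := le_antisymm hler hged
    have heqidx : r.toNat = p := by
      have h1 : (sp.map Prod.fst)[r.toNat]'(by simpa using hrlt) = (sp.map Prod.fst)[p]'(by simpa using hp) := by
        simp [hfst, hpe]
      exact (List.Nodup.getElem_inj_iff hnodup).1 h1
    have hget : PySem.List.pyGetD sp r (0, 0) = sp[r.toNat] := by
      rw [PySem.List.pyGetD_eq_getElem sp (0, 0) hr0 (by omega)]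
    rw [if_pos ⟨by omega, by rw [hget]; exact hfst⟩, hget]
    simp [heqidx, hpe]
  | none =>
    rw [if_neg]
    rintro ⟨hlen, hfst⟩
    have hrlt : r.toNat < sp.length := by omega
    have hget : PySem.List.pyGetD sp r (0, 0) = sp[r.toNat] := by
      rw [PySem.List.pyGetD_eq_getElem sp (0, 0) hr0 (by omega)]
    rw [hget] at hfst
    have : ((sp[r.toNat]).1, (sp[r.toNat]).2) ∈ sp := by
      rw [Prod.mk.eta]; exact List.getElem_mem hrlt
    rw [hfst] at this
    rw [(hmem d _).1 this] at hscan
    simp at hscan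


-- A's index loop over range(len(xs)) is the fold over enumerate(xs)
lemma foldl_pyRange_eq_enum {β : Type} (g : β → Int → Int → β) :
    ∀ (xs full : List Int) (a : Int) (st : β), 0 ≤ a → full.drop a.toNat = xs →
    (PySem.List.pyRange a (full.length : Int) 1).foldl
        (fun s i => g s i (PySem.List.pyGetD full i 0)) st
      = (PySem.List.enumerate xs a).foldl (fun s p => g s p.1 p.2) st := by
  intro xs
  induction xs with
  | nil =>
    intro full a st ha hdrop
    have h0 : full.length - a.toNat = 0 := by
      simpa using congrArg List.length hdrop
    rw [PySem.List.pyRange_one_eq_nil (by omega)]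
    simp [PySem.List.enumerate_nil]
  | cons x xs ih =>
    intro full a st ha hdrop
    have hlt : a.toNat < full.length := by
      by_contra h
      rw [List.drop_eq_nil_of_le (by omega)] at hdrop
      simp at hdrop
    have hget : full[a.toNat]'hlt = x := by
      have h2 : (full.drop a.toNat)[0]'(by rw [hdrop]; simp) = x := by
        simp [hdrop]
      simpa [List.getElem_drop] using h2
    have hdrop' : full.drop (a + 1).toNat = xs := by
      have h1 : (a + 1).toNat = a.toNat + 1 := by omega
      rw [h1, ← List.drop_drop, hdrop]
      simp
    rw [PySem.List.pyRange_one_cons (by omega), List.foldl_cons,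
        PySem.List.enumerate_cons, List.foldl_cons]
    have hgd : PySem.List.pyGetD full a 0 = x := by
      rw [PySem.List.pyGetD_eq_getElem full 0 ha (by omega)]
      exact hget
    rw [hgd]
    exact ih full (a + 1) (g st a x) (by omega) hdrop'

-- the 4-list state of A against the 3-list state of B (A's two date lists stay equal)
lemma fold_states (find : Int → Option Int) (v1 v2 : List Int) :
    ∀ (l : List (Int × Int)) (p q r : List Int),
    l.foldl (fun (s : List Int × List Int × List Int × List Int) (pr : Int × Int) =>
        match find pr.2 with
        | some j => (s.1 ++ [pr.2], s.2.1 ++ [PySem.List.pyGetD v1 pr.1 0],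
                     s.2.2.1 ++ [pr.2], s.2.2.2 ++ [PySem.List.pyGetD v2 j 0])
        | none => s) (p, q, p, r)
      = ((l.foldl (fun (s : List Int × List Int × List Int) (pr : Int × Int) =>
          match find pr.2 with
          | some j => (s.1 ++ [pr.2], s.2.1 ++ [PySem.List.pyGetD v1 pr.1 0],
                       s.2.2 ++ [PySem.List.pyGetD v2 j 0])
          | none => s) (p, q, r)).1,
         (l.foldl (fun (s : List Int × List Int × List Int) (pr : Int × Int) =>
          match find pr.2 with
          | some j => (s.1 ++ [pr.2], s.2.1 ++ [PySem.List.pyGetD v1 pr.1 0],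
                       s.2.2 ++ [PySem.List.pyGetD v2 j 0])
          | none => s) (p, q, r)).2.1,
         (l.foldl (fun (s : List Int × List Int × List Int) (pr : Int × Int) =>
          match find pr.2 with
          | some j => (s.1 ++ [pr.2], s.2.1 ++ [PySem.List.pyGetD v1 pr.1 0],
                       s.2.2 ++ [PySem.List.pyGetD v2 j 0])
          | none => s) (p, q, r)).1,
         (l.foldl (fun (s : List Int × List Int × List Int) (pr : Int × Int) =>
          match find pr.2 with
          | some j => (s.1 ++ [pr.2], s.2.1 ++ [PySem.List.pyGetD v1 pr.1 0],
                       s.2.2 ++ [PySem.List.pyGetD v2 j 0])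
          | none => s) (p, q, r)).2.2) := by
  intro l
  induction l with
  | nil => intro p q r; simp
  | cons pr l ih =>
    intro p q r
    rw [List.foldl_cons, List.foldl_cons]
    cases h : find pr.2 with
    | none => simpa [h] using ih p q r
    | some j => simpa [h] using ih (p ++ [pr.2]) (q ++ [PySem.List.pyGetD v1 pr.1 0]) (r ++ [PySem.List.pyGetD v2 j 0])

-- ===== VERDICT (by name: the statement is the Claim_ definition above) =====
theorem removeExtraDatesAndCloseValues_spec : Claim_equal_removeExtraDatesAndCloseValues := by
  intro list1 list2 _ _
  unfold Spec_removeExtraDatesAndCloseValues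
  unfold removeExtraDatesAndCloseValues removeExtraDatesAndCloseValues_alt
  have hloc : ∀ x : Int,
      pvLocate (PySem.List.sorted (pvPairs (PySem.List.pyGetD list2 0 [])) (fun p => p.1) false) x
        = pvScanA x (PySem.List.pyGetD list2 0 []) 0 := fun x => pvLocate_eq_scan _ x
  simp only [hloc]
  rw [foldl_pyRange_eq_enum
      (fun (s : List Int × List Int × List Int × List Int) i x =>
        match pvScanA x (PySem.List.pyGetD list2 0 []) 0 with
        | some j => (s.1 ++ [x], s.2.1 ++ [PySem.List.pyGetD (PySem.List.pyGetD list1 1 []) i 0],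
                     s.2.2.1 ++ [x], s.2.2.2 ++ [PySem.List.pyGetD (PySem.List.pyGetD list2 1 []) j 0])
        | none => s)
      (PySem.List.pyGetD list1 0 []) (PySem.List.pyGetD list1 0 []) 0 _ le_rfl (by simp)]
  rw [fold_states (fun x => pvScanA x (PySem.List.pyGetD list2 0 []) 0)]
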